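-- pv_equiv track=rewrite | github.com/AI-Nhat-Phuc/story-creator | api/schemas/gpt_schemas.py | _sanitize_prompt_text
-- ===== SOURCE A (Python) =====
-- _PROMPT_INJECTION_MARKERS = (
--     'system:',
--     'assistant:',
--     '<|im_start|>',
--     '<|im_end|>',
--     '```',
-- )
--
-- def _sanitize_prompt_text(value):
--     """Strip prompt-injection markers from a string (case-insensitive).
--
--     Returns the value unchanged if it is not a string. Non-string inputs
--     are handled upstream by Marshmallow field validation.
--     """
--     if not isinstance(value, str):
--         return value
--     sanitized = value
--     lowered = sanitized.lower()
--     for marker in _PROMPT_INJECTION_MARKERS: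
--         # Case-insensitive replace while preserving other characters.
--         idx = lowered.find(marker)
--         while idx != -1:
--             sanitized = sanitized[:idx] + sanitized[idx + len(marker):]
--             lowered = sanitized.lower()
--             idx = lowered.find(marker)
--     return sanitized
-- ===== SOURCE B (Python) =====
-- _PROMPT_INJECTION_MARKERS = (
--     'system:',
--     'assistant:',
--     '<|im_start|>',
--     '<|im_end|>',
--     '```',
-- )
--
--
-- def _sanitize_prompt_text(value):
--     """Strip prompt-injection markers (case-insensitive) in one stack pass per marker."""
--     if not isinstance(value, str):
--         return value
--     for marker in _PROMPT_INJECTION_MARKERS: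
--         n = len(marker)
--         out = []
--         for ch in value:
--             out.append(ch)
--             if len(out) >= n and ''.join(out[-n:]).lower() == marker:
--                 del out[-n:]
--         value = ''.join(out)
--     return value
-- ===== Notes on version B (the rewrite author's own statement) =====
-- stated objective: alternative
-- what changed: Replaces A's repeated find-remove-relower loop per marker (rescanning and re-lowering the whole string after every removal) with a single left-to-right stack pass per marker that appends each character and pops the marker whenever the buffer's case-lowered tail equals it.
import Mathlib
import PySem

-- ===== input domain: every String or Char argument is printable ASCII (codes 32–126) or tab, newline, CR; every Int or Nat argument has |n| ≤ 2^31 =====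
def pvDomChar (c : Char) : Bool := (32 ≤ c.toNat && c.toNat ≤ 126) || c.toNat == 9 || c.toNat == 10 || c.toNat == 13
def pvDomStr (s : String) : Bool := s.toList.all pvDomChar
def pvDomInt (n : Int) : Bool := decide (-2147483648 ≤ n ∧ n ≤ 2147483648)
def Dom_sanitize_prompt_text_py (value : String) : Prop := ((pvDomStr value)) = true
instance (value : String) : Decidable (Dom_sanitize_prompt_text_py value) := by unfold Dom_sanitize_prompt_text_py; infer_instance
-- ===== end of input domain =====

-- B replaces A's per-marker find/remove/re-lower loop with a single stack pass per marker
-- (append each char, pop the marker when the buffer's lowered tail equals it); same return value.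

-- the module constant _PROMPT_INJECTION_MARKERS (shared by both ports, as in the Python module)
def pvMarkers : List (List Char) :=
  ["system:".toList, "assistant:".toList, "<|im_start|>".toList, "<|im_end|>".toList, "```".toList]

-- termination fact for A's while loop (the found index + marker length fits in the string)
theorem pvFind_bound (m s : List Char)
    (hi : PySem.Chars.find (PySem.Chars.lower s) m ≠ -1) :
    (PySem.Chars.find (PySem.Chars.lower s) m).toNat + m.length ≤ s.length := by
  have h0 : 0 ≤ PySem.Chars.find (PySem.Chars.lower s) m := by
    have := PySem.Chars.neg_one_le_find (PySem.Chars.lower s) m; omega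
  have hsp := (PySem.Chars.find_spec (s := PySem.Chars.lower s) (sub := m) h0).1
  have hle := hsp.length_le
  have hll : (PySem.Chars.lower s).length = s.length := by
    simp [PySem.Chars.lower]
  have hfl := PySem.Chars.find_le_length (PySem.Chars.lower s) m
  simp [List.length_drop, hll] at hle
  omega

-- ===== PORT A =====
-- A's while loop for one marker: find in the lowered string, remove by slicing, repeat.
-- (the 'marker = []' guard is only for totality — every marker in pvMarkers is nonempty;
--  Python would loop forever on an empty marker)
def pvLoopA (marker : List Char) (s : List Char) : List Char :=
  if _hm : marker = [] then s
  else
    -- idx = lowered.find(marker), inlined at its two uses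
    if _hi : PySem.Chars.find (PySem.Chars.lower s) marker = -1 then s
    else pvLoopA marker
      (PySem.List.slice s none (some (PySem.Chars.find (PySem.Chars.lower s) marker)) ++
       PySem.List.slice s
         (some (PySem.Chars.find (PySem.Chars.lower s) marker + (marker.length : Int))) none)
termination_by s.length
decreasing_by
  have h0 : 0 ≤ PySem.Chars.find (PySem.Chars.lower s) marker := by
    have := PySem.Chars.neg_one_le_find (PySem.Chars.lower s) marker; omega
  have hb := pvFind_bound marker s _hi
  obtain ⟨k, hk⟩ : ∃ k : ℕ, PySem.Chars.find (PySem.Chars.lower s) marker = (k : Int) :=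
    ⟨_, (Int.toNat_of_nonneg h0).symm⟩
  rw [hk] at hb ⊢
  have hcast : (k : Int) + (marker.length : Int) = ((k + marker.length : ℕ) : Int) := by push_cast; ring
  rw [hcast, PySem.List.slice_to_natCast, PySem.List.slice_from_natCast]
  have hm1 : 1 ≤ marker.length := List.length_pos_iff.mpr _hm
  simp only [List.length_append, List.length_take, List.length_drop]
  simp only [Int.toNat_natCast] at hb ⊢
  omega

def sanitize_prompt_text_py (value : String) : String :=
  String.mk (pvMarkers.foldl (fun s m => pvLoopA m s) value.toList)

-- ===== PORT B =====
-- B's inner pass for one marker: out buffer; append each char; when the lowered tail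
-- of the buffer equals the marker, delete that tail.
def pvPassB (marker : List Char) (out : List Char) : List Char → List Char
  | [] => out
  | c :: cs =>
    let o := out ++ [c]
    if marker.length ≤ o.length ∧
        (o.drop (o.length - marker.length)).map PySem.Chars.lowerChar = marker then
      pvPassB marker (o.take (o.length - marker.length)) cs
    else
      pvPassB marker o cs

def sanitize_prompt_text_py_alt (value : String) : String :=
  String.mk (pvMarkers.foldl (fun s m => pvPassB m [] s) value.toList)

-- ===== PRECONDITION & SPEC =====
def Spec_sanitize_prompt_text_py (value : String) (out : String) : Prop := out = sanitize_prompt_text_py_alt value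
instance (value : String) (out : String) : Decidable (Spec_sanitize_prompt_text_py value out) := by unfold Spec_sanitize_prompt_text_py; infer_instance

-- ===== CLAIM (what is proved, stated in full; the proofs are below) =====
def Claim_equal_sanitize_prompt_text_py : Prop := ∀ (value : String), Dom_sanitize_prompt_text_py value → Spec_sanitize_prompt_text_py value (sanitize_prompt_text_py value)

-- ===== LEMMAS AND PROOFS =====

-- abbreviation used throughout: Python's str.lower on a char list is a per-char map
theorem pvLower_eq (s : List Char) : PySem.Chars.lower s = s.map PySem.Chars.lowerChar := rfl

-- while no pop fires along t, the pass just moves t onto the buffer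
theorem pvPrefix_run (m : List Char) :
    ∀ (t out v : List Char),
      (∀ p, p ≠ [] → p <+: t → ¬ m <:+ (out ++ p).map PySem.Chars.lowerChar) →
      pvPassB m out (t ++ v) = pvPassB m (out ++ t) v := by
  intro t
  induction t with
  | nil => intro out v _; simp
  | cons c cs ih =>
    intro out v h
    have hnot : ¬ (m.length ≤ (out ++ [c]).length ∧
        ((out ++ [c]).drop ((out ++ [c]).length - m.length)).map PySem.Chars.lowerChar = m) := by
      rintro ⟨hle, heq⟩
      rw [List.map_drop] at heq
      exact h [c] (by simp) ⟨cs, rfl⟩ (heq ▸ List.drop_suffix _ _)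
    have step : pvPassB m out ((c :: cs) ++ v) = pvPassB m (out ++ [c]) (cs ++ v) := by
      simp only [List.cons_append, pvPassB]
      rw [if_neg hnot]
    have h' : ∀ p, p ≠ [] → p <+: cs → ¬ m <:+ ((out ++ [c]) ++ p).map PySem.Chars.lowerChar := by
      intro p hp hpc
      have := h (c :: p) (by simp) ((List.prefix_cons_inj c).mpr hpc)
      simpa using this
    rw [step, ih (out ++ [c]) v h', List.append_assoc]
    rfl

-- the pop condition, stated as a suffix of the lowered buffer
theorem pvCond_iff (m o : List Char) :
    (m.length ≤ o.length ∧
       (o.drop (o.length - m.length)).map PySem.Chars.lowerChar = m)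
      ↔ m <:+ o.map PySem.Chars.lowerChar ∧ m.length ≤ o.length := by
  constructor
  · rintro ⟨hle, heq⟩
    rw [List.map_drop] at heq
    exact ⟨heq ▸ List.drop_suffix _ _, hle⟩
  · rintro ⟨⟨x, hx⟩, hle⟩
    refine ⟨hle, ?_⟩
    have hxl : x.length = o.length - m.length := by
      have := congrArg List.length hx
      simp at this; omega
    rw [List.map_drop, ← hx, hxl.symm, List.drop_left]

-- main per-marker equivalence: A's find/remove loop = B's stack pass
theorem pvLoop_eq_pass (m : List Char) (hm : m ≠ []) (s : List Char) :
    pvLoopA m s = pvPassB m [] s := by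
  suffices H : ∀ N, ∀ s : List Char, s.length < N → pvLoopA m s = pvPassB m [] s from
    H (s.length + 1) s (by omega)
  intro N
  induction N with
  | zero => intro s hs; omega
  | succ N ih =>
    intro s hs
    set L : List Char → List Char := fun t => t.map PySem.Chars.lowerChar with hL
    by_cases hi : PySem.Chars.find (PySem.Chars.lower s) m = -1
    · -- no occurrence: A returns s; B's pass copies s through
      rw [pvLoopA, dif_neg hm, dif_pos hi]
      have hno : ¬ m <:+: PySem.Chars.lower s := (PySem.Chars.find_eq_neg_one_iff _ _).mp hi
      have harg : ∀ p : List Char, p ≠ [] → p <+: s →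
          ¬ m <:+ ([] ++ p).map PySem.Chars.lowerChar := by
        intro p hp hps hsuf
        refine hno ?_
        rw [pvLower_eq]
        exact (by simpa using hsuf : m <:+ p.map PySem.Chars.lowerChar).isInfix.trans
          ((hps.map _).isInfix)
      have := pvPrefix_run m s [] [] harg
      simpa using this.symm
    · -- first occurrence at i: both sides reduce to the string with s[i:i+n] removed
      have h0 : 0 ≤ PySem.Chars.find (PySem.Chars.lower s) m := by
        have := PySem.Chars.neg_one_le_find (PySem.Chars.lower s) m; omega
      set i := (PySem.Chars.find (PySem.Chars.lower s) m).toNat with hidef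
      set n := m.length with hn
      have hb : i + n ≤ s.length := pvFind_bound m s hi
      have hsp := PySem.Chars.find_spec (s := PySem.Chars.lower s) (sub := m) h0
      have hpre : m <+: (L s).drop i := hsp.1
      have hmin : ∀ j < i, ¬ m <+: (L s).drop j := fun j hj hmem => hsp.2 j hj hmem
      set u := s.take i with hu
      set w := (s.drop i).take n with hw
      set v := s.drop (i + n) with hv
      have hulen : u.length = i := by simp [hu]; omega
      have hwlen : w.length = n := by simp [hw]; omega
      have hsplit : s = u ++ w ++ v := by
        rw [hu, hw, hv, List.append_assoc, ← List.drop_drop, List.take_append_drop,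
          List.take_append_drop]
      have hLw : L w = m := by
        have h1 : m = ((L s).drop i).take n := by
          rw [(List.prefix_iff_eq_take.mp hpre)]
        rw [hw, hL]
        simp only [List.map_take, List.map_drop]
        exact h1.symm
      -- any prefix of s shorter than i+n has no lowered suffix m
      have hshort : ∀ p : List Char, p <+: s → p.length < i + n → ¬ m <:+ L p := by
        rintro p hps hplen ⟨x, hx⟩
        have hxl : x.length + n = p.length := by
          have := congrArg List.length hx; simpa [hL, hn] using this
        have hj : x.length < i := by omega
        apply hmin x.length hj
        have hpt : L p = (L s).take p.length := by
          rw [List.prefix_iff_eq_take.mp hps, hL]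
          simp [List.map_take]
        have hdecomp : (L s).drop x.length =
            ((L s).take p.length).drop x.length ++ (L s).drop p.length := by
          conv_lhs => rw [← List.take_append_drop p.length (L s)]
          rw [List.drop_append_of_le_length (by simp [hL]; omega)]
        rw [hdecomp, ← hpt, ← hx, List.drop_left]
        exact ⟨(L s).drop p.length, rfl⟩
      -- B fires exactly once at the seam: pass [] s = pass u v
      have hfire : pvPassB m [] s = pvPassB m u v := by
        have hn1 : 1 ≤ n := List.length_pos_iff.mpr hm
        have hwne : w ≠ [] := by
          intro h; rw [h] at hwlen; simp at hwlen
          omega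
        have htne : u ++ w ≠ [] := by simp [hwne]
        obtain ⟨t', c, htc⟩ : ∃ t' c, u ++ w = t' ++ [c] :=
          ⟨(u ++ w).dropLast, (u ++ w).getLast htne, (List.dropLast_append_getLast htne).symm⟩
        have ht'len : t'.length + 1 = i + n := by
          have := congrArg List.length htc; simp [hulen, hwlen] at this; omega
        have hrun : pvPassB m [] (s) = pvPassB m t' (c :: v) := by
          conv_lhs => rw [hsplit, htc, List.append_assoc, List.singleton_append]
          have harg : ∀ p : List Char, p ≠ [] → p <+: t' →
              ¬ m <:+ ([] ++ p).map PySem.Chars.lowerChar := by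
            intro p hp hpt' hsuf
            have hpuw : p <+: u ++ w := hpt'.trans (htc ▸ ⟨[c], rfl⟩)
            have hps : p <+: s := hpuw.trans (hsplit ▸ ⟨v, rfl⟩)
            have hplen : p.length < i + n := by
              have := hpt'.length_le; omega
            exact hshort p hps hplen (by simpa using hsuf)
          have := pvPrefix_run m t' [] (c :: v) harg
          simpa using this
        rw [hrun]
        have hcond : m.length ≤ (t' ++ [c]).length ∧
            ((t' ++ [c]).drop ((t' ++ [c]).length - m.length)).map PySem.Chars.lowerChar = m := by
          rw [← htc]
          apply (pvCond_iff m (u ++ w)).mpr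
          constructor
          · rw [List.map_append]
            rw [show (w.map PySem.Chars.lowerChar) = m from hLw]
            exact ⟨u.map PySem.Chars.lowerChar, rfl⟩
          · simp [hulen, hwlen, hn]
        have hstep : pvPassB m t' (c :: v) = pvPassB m ((t' ++ [c]).take ((t' ++ [c]).length - m.length)) v := by
          simp only [pvPassB]
          rw [if_pos hcond]
        rw [hstep, ← htc]
        congr 1
        have : (u ++ w).length - m.length = u.length := by simp [hulen, hwlen, hn]
        rw [this, List.take_left]
      -- B also reaches pass u v starting from u ++ v (no pop inside u)
      have hskip : pvPassB m [] (u ++ v) = pvPassB m u v := by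
        have harg : ∀ p : List Char, p ≠ [] → p <+: u →
            ¬ m <:+ ([] ++ p).map PySem.Chars.lowerChar := by
          intro p hp hpu hsuf
          have hus : u <+: s := by
            rw [hsplit, List.append_assoc]; exact ⟨w ++ v, rfl⟩
          have hps : p <+: s := hpu.trans hus
          have hplen : p.length < i + n := by
            have := hpu.length_le; rw [hulen] at this
            have hn1 : 1 ≤ n := List.length_pos_iff.mpr hm
            omega
          exact hshort p hps hplen (by simpa using hsuf)
        have := pvPrefix_run m u [] v harg
        simpa using this
      -- A's one removal step lands on u ++ v
      have hstepA : pvLoopA m s = pvLoopA m (u ++ v) := by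
        rw [pvLoopA, dif_neg hm, dif_neg hi]
        congr 1
        obtain ⟨k, hk⟩ : ∃ k : ℕ, PySem.Chars.find (PySem.Chars.lower s) m = (k : Int) :=
          ⟨_, (Int.toNat_of_nonneg h0).symm⟩
        have hki : k = i := by rw [hidef, hk]; simp
        rw [hk, show (k : Int) + (m.length : Int) = ((k + m.length : ℕ) : Int) by push_cast; ring,
          PySem.List.slice_to_natCast, PySem.List.slice_from_natCast, hki]
      have hlen_uv : (u ++ v).length < N := by
        have hn1 : 1 ≤ n := List.length_pos_iff.mpr hm
        have hvlen : v.length = s.length - (i + n) := by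
          rw [hv, List.length_drop]
        have huv : (u ++ v).length = u.length + v.length := List.length_append
        omega
      rw [hstepA, ih (u ++ v) hlen_uv, hskip, hfire]

-- ===== VERDICT (by name: the statement is the Claim_ definition above) =====
theorem sanitize_prompt_text_py_spec : Claim_equal_sanitize_prompt_text_py := by
  intro value _
  unfold Spec_sanitize_prompt_text_py sanitize_prompt_text_py sanitize_prompt_text_py_alt
  congr 1
  simp only [pvMarkers, List.foldl_cons, List.foldl_nil]
  repeat rw [pvLoop_eq_pass _ (by decide)]
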